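-- pv_equiv track=rewrite | github.com/bcmeireles/Buggy-Data-Base | bdb.py | fix_word
-- ===== SOURCE A (Python) =====
-- def fix_word(word):
--     """
--     Recovers the words, fixing the letter outbreaks that occurrered
--
--     In a pair of a uppercase letter followed by that same letter but lowercase, or the opposite, we remove both characters
--     and repeat until that sort of outbreak doesn't happen anymore
--
--     str --> str
--     """
--
--     for i in range(len(word) - 1):
--         if (word[i].islower() and word[i + 1].isupper() and word[i].lower() == word[i + 1].lower()) or (word[i].isupper() and word[i + 1].islower() and word[i].upper() == word[i + 1].upper()): # verificar se vem upper/lower seguido do oposto e se a letter é a mesma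
--             word2 = word[:i] + word[i+2:]
--     try: # if no changes are made to the word, word2 never gets definied and a NameError gets thrown, so a try/except is used to catch it
--         if word2 == word:
--             return word2
--         else:
--             return fix_word(word2) # Since changes have been made, search for more recursively
--     except NameError:
--         return word # If no changes are made
-- ===== SOURCE B (Python) =====
-- def fix_word(word):
--     """Single pass with a stack: push each character; when a character is the
--     case-flipped twin of the stack top, pop instead (the pair cancels)."""
--     stack = []
--     for ch in word:
--         if stack and ch.isalpha() and stack[-1] == ch.swapcase():
--             stack.pop()
--         else:
--             stack.append(ch)
--     return ''.join(stack)
-- ===== Notes on version B (the rewrite author's own statement) =====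
-- stated objective: simpler
-- what changed: Replaces A's scan-remove-recurse structure (rescan the whole word, splice out the last matching pair, recurse until no pair is left) with a single left-to-right pass over a stack that pops when the incoming character is the case-flipped twin of the top.
import Mathlib
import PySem

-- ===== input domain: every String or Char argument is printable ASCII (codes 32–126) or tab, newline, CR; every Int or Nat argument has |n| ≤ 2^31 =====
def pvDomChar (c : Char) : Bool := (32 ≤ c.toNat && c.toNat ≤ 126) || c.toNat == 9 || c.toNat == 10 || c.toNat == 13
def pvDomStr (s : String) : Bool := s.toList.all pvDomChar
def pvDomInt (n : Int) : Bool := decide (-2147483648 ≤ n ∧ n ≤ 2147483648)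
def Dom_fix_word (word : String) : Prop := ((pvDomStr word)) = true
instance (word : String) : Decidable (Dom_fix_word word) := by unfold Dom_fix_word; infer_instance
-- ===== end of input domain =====

-- B replaces A's scan-remove-recurse structure by a single left-to-right pass with a stack
-- (pop when the next character is the case-flipped twin of the top); same return value.

-- ===== PORT A =====

-- A's pair test, verbatim: (word[i].islower() and word[i+1].isupper() and word[i].lower() == word[i+1].lower())
--                       or (word[i].isupper() and word[i+1].islower() and word[i].upper() == word[i+1].upper())
def pvOpp (a b : Char) : Bool :=
  (PySem.Chars.islower a && PySem.Chars.isupper b && (PySem.Chars.lowerChar a == PySem.Chars.lowerChar b)) ||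
  (PySem.Chars.isupper a && PySem.Chars.islower b && (PySem.Chars.upperChar a == PySem.Chars.upperChar b))

-- A's `for i in range(len(word) - 1)` loop: `word2` is None until a pair is seen, then the
-- slice-splice for the latest matching i.  Every index i used is in range, so word[i] is
-- cs.getD i ' ' and word[:i] / word[i+2:] are take / drop exactly.
def pvScan (cs : List Char) : Option (List Char) :=
  (List.range (cs.length - 1)).foldl
    (fun acc i => if pvOpp (cs.getD i ' ') (cs.getD (i + 1) ' ') then some (cs.take i ++ cs.drop (i + 2)) else acc)
    none

-- shape of pvScan's result (the port's recursion terminates because of it)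
theorem pvFoldl_scan_some {α : Type} (cond : Nat → Bool) (g : Nat → α) :
    ∀ (l : List Nat) (acc : Option α) (w : α),
      l.foldl (fun a i => if cond i then some (g i) else a) acc = some w →
      acc = some w ∨ ∃ i ∈ l, cond i = true ∧ w = g i := by
  intro l
  induction l with
  | nil => intro acc w h; exact Or.inl h
  | cons x xs ih =>
    intro acc w h
    simp only [List.foldl_cons] at h
    rcases ih _ w h with h' | ⟨i, hi, hc, hw⟩
    · by_cases hx : cond x = true
      · right; exact ⟨x, by simp, hx, by simp [hx] at h'; exact h'.symm⟩
      · left; simpa [hx] using h'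
    · right; exact ⟨i, by simp [hi], hc, hw⟩

theorem pvScan_shape {cs : List Char} {w : List Char} (h : pvScan cs = some w) :
    ∃ i, i + 1 < cs.length ∧ pvOpp (cs.getD i ' ') (cs.getD (i + 1) ' ') = true ∧
      w = cs.take i ++ cs.drop (i + 2) := by
  rcases pvFoldl_scan_some _ _ _ _ _ h with h' | ⟨i, hi, hc, hw⟩
  · exact absurd h' (by simp)
  · exact ⟨i, by have := List.mem_range.mp hi; omega, hc, hw⟩

theorem pvScan_length {cs w : List Char} (h : pvScan cs = some w) : w.length + 2 = cs.length := by
  rcases pvScan_shape h with ⟨i, hi, _, rfl⟩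
  simp [List.length_take, List.length_drop]
  omega

def fix_word (word : String) : String :=
  match h : pvScan word.toList with
  | none => word                                   -- NameError branch: no pair was found
  | some w2 =>
      if String.ofList w2 == word then String.ofList w2
      else fix_word (String.ofList w2)
termination_by word.toList.length
decreasing_by
  have := pvScan_length h
  simp only [String.toList_ofList]
  omega

-- ===== PORT B =====

-- ch.swapcase() for one ASCII character
def pvSwapcase (c : Char) : Char :=
  if PySem.Chars.islower c then PySem.Chars.upperChar c
  else if PySem.Chars.isupper c then PySem.Chars.lowerChar c else c

-- one loop iteration on the stack (kept top-first; Python appends at the right end)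
def pvPush (s : List Char) (c : Char) : List Char :=
  match s with
  | t :: rest => if PySem.Chars.isalpha c && t == pvSwapcase c then rest else c :: t :: rest
  | [] => [c]

def fix_word_alt (word : String) : String :=
  String.ofList ((word.toList.foldl pvPush []).reverse)

-- ===== PRECONDITION & SPEC =====
def Spec_fix_word (word : String) (out : String) : Prop := out = fix_word_alt word
instance (word : String) (out : String) : Decidable (Spec_fix_word word out) := by unfold Spec_fix_word; infer_instance

-- ===== CLAIM (what is proved, stated in full; the proofs are below) =====
def Claim_equal_fix_word : Prop := ∀ (word : String), Dom_fix_word word → Spec_fix_word word (fix_word word)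

-- ===== LEMMAS AND PROOFS =====

-- characterisation of A's pair test on code points
theorem pv_toNat_inj {a b : Char} (h : a.toNat = b.toNat) : a = b := by
  apply Char.ext
  exact UInt32.toNat_inj.mp h

theorem pv_le_iff {a b : Char} : a ≤ b ↔ a.toNat ≤ b.toNat := by
  rw [Char.le_def]; exact UInt32.le_iff_toNat_le

theorem pv_islower_iff (c : Char) : PySem.Chars.islower c = true ↔ 97 ≤ c.toNat ∧ c.toNat ≤ 122 := by
  unfold PySem.Chars.islower
  have h1 : ('a' : Char).toNat = 97 := rfl
  have h2 : ('z' : Char).toNat = 122 := rfl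
  simp [pv_le_iff, h1, h2]

theorem pv_isupper_iff (c : Char) : PySem.Chars.isupper c = true ↔ 65 ≤ c.toNat ∧ c.toNat ≤ 90 := by
  unfold PySem.Chars.isupper
  have h1 : ('A' : Char).toNat = 65 := rfl
  have h2 : ('Z' : Char).toNat = 90 := rfl
  simp [pv_le_iff, h1, h2]

theorem pv_upperChar_toNat {c : Char} (h : PySem.Chars.islower c = true) :
    (PySem.Chars.upperChar c).toNat = c.toNat - 32 := by
  have hb := (pv_islower_iff c).mp h
  unfold PySem.Chars.upperChar
  rw [if_pos h, Char.toNat_ofNat, if_pos (Or.inl (by omega))]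

theorem pv_lowerChar_toNat {c : Char} (h : PySem.Chars.isupper c = true) :
    (PySem.Chars.lowerChar c).toNat = c.toNat + 32 := by
  have hb := (pv_isupper_iff c).mp h
  unfold PySem.Chars.lowerChar
  rw [if_pos h, Char.toNat_ofNat, if_pos (Or.inl (by omega))]

theorem pv_lowerChar_id {c : Char} (h : PySem.Chars.isupper c = false) :
    PySem.Chars.lowerChar c = c := by
  unfold PySem.Chars.lowerChar; rw [if_neg (by simp [h])]

theorem pv_upperChar_id {c : Char} (h : PySem.Chars.islower c = false) :
    PySem.Chars.upperChar c = c := by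
  unfold PySem.Chars.upperChar; rw [if_neg (by simp [h])]

theorem pvOpp_iff (a b : Char) : pvOpp a b = true ↔
    (97 ≤ a.toNat ∧ a.toNat ≤ 122 ∧ 65 ≤ b.toNat ∧ b.toNat ≤ 90 ∧ a.toNat = b.toNat + 32) ∨
    (65 ≤ a.toNat ∧ a.toNat ≤ 90 ∧ 97 ≤ b.toNat ∧ b.toNat ≤ 122 ∧ b.toNat = a.toNat + 32) := by
  unfold pvOpp
  simp only [Bool.or_eq_true, Bool.and_eq_true, beq_iff_eq, pv_islower_iff, pv_isupper_iff]
  constructor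
  · rintro (⟨⟨⟨ha1, ha2⟩, hb1, hb2⟩, he⟩ | ⟨⟨⟨ha1, ha2⟩, hb1, hb2⟩, he⟩)
    · left
      have h1 : PySem.Chars.lowerChar a = a :=
        pv_lowerChar_id (by rw [Bool.eq_false_iff, Ne, pv_isupper_iff]; omega)
      have h2 : (PySem.Chars.lowerChar b).toNat = b.toNat + 32 :=
        pv_lowerChar_toNat ((pv_isupper_iff b).mpr ⟨hb1, hb2⟩)
      have := congrArg Char.toNat he
      rw [h1, h2] at this
      omega
    · right
      have h1 : PySem.Chars.upperChar a = a :=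
        pv_upperChar_id (by rw [Bool.eq_false_iff, Ne, pv_islower_iff]; omega)
      have h2 : (PySem.Chars.upperChar b).toNat = b.toNat - 32 :=
        pv_upperChar_toNat ((pv_islower_iff b).mpr ⟨hb1, hb2⟩)
      have := congrArg Char.toNat he
      rw [h1, h2] at this
      omega
  · rintro (⟨h1, h2, h3, h4, h5⟩ | ⟨h1, h2, h3, h4, h5⟩)
    · refine Or.inl ⟨⟨⟨h1, h2⟩, h3, h4⟩, ?_⟩
      apply pv_toNat_inj
      rw [pv_lowerChar_id (c := a) (by rw [Bool.eq_false_iff, Ne, pv_isupper_iff]; omega),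
          pv_lowerChar_toNat ((pv_isupper_iff b).mpr ⟨h3, h4⟩)]
      omega
    · refine Or.inr ⟨⟨⟨h1, h2⟩, h3, h4⟩, ?_⟩
      apply pv_toNat_inj
      rw [pv_upperChar_id (c := a) (by rw [Bool.eq_false_iff, Ne, pv_islower_iff]; omega),
          pv_upperChar_toNat ((pv_islower_iff b).mpr ⟨h3, h4⟩)]
      omega

-- B's loop test equals A's pair test (stack top t, incoming character c)
theorem pv_cond_eq (t c : Char) :
    (PySem.Chars.isalpha c && t == pvSwapcase c) = pvOpp t c := by
  by_cases h : pvOpp t c = true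
  · rw [h]
    rcases (pvOpp_iff t c).mp h with ⟨h1, h2, h3, h4, h5⟩ | ⟨h1, h2, h3, h4, h5⟩
    · have hlb : PySem.Chars.islower c = false := by rw [Bool.eq_false_iff, Ne, pv_islower_iff]; omega
      have hub : PySem.Chars.isupper c = true := (pv_isupper_iff c).mpr ⟨h3, h4⟩
      have : t = pvSwapcase c := by
        apply pv_toNat_inj
        unfold pvSwapcase
        rw [if_neg (by simp [hlb]), if_pos hub, pv_lowerChar_toNat hub]
        omega
      unfold PySem.Chars.isalpha
      simp [this, hub]
    · have hlb : PySem.Chars.islower c = true := (pv_islower_iff c).mpr ⟨h3, h4⟩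
      have : t = pvSwapcase c := by
        apply pv_toNat_inj
        unfold pvSwapcase
        rw [if_pos hlb, pv_upperChar_toNat hlb]
        omega
      unfold PySem.Chars.isalpha
      simp [this, hlb]
  · rw [Bool.eq_false_iff.mpr h, Bool.and_eq_false_iff]
    by_cases ha : PySem.Chars.isalpha c = true
    · right
      rw [beq_eq_false_iff_ne]
      intro ht
      apply h
      apply (pvOpp_iff t c).mpr
      unfold PySem.Chars.isalpha at ha
      rcases Bool.or_eq_true_iff.mp ha with hu | hl
      · have hb := (pv_isupper_iff c).mp hu
        have hlb : PySem.Chars.islower c = false := by rw [Bool.eq_false_iff, Ne, pv_islower_iff]; omega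
        have : t.toNat = c.toNat + 32 := by
          rw [ht]; unfold pvSwapcase
          rw [if_neg (by simp [hlb]), if_pos hu, pv_lowerChar_toNat hu]
        left; omega
      · have hb := (pv_islower_iff c).mp hl
        have : t.toNat = c.toNat - 32 := by
          rw [ht]; unfold pvSwapcase
          rw [if_pos hl, pv_upperChar_toNat hl]
        right; omega
    · left; simpa using ha

theorem pvOpp_unique {t a b : Char} (h1 : pvOpp t a = true) (h2 : pvOpp a b = true) : t = b := by
  rcases (pvOpp_iff t a).mp h1 with ⟨_, _, _, _, _⟩ | ⟨_, _, _, _, _⟩ <;>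
    rcases (pvOpp_iff a b).mp h2 with ⟨_, _, _, _, _⟩ | ⟨_, _, _, _, _⟩ <;>
    exact pv_toNat_inj (by omega)

-- the stack is always free of cancellable adjacent pairs
def pvGood (s : List Char) : Prop := List.IsChain (fun x y => pvOpp y x = false) s

theorem pvPush_nil (c : Char) : pvPush [] c = [c] := rfl

theorem pvPush_cons (t : Char) (rest : List Char) (c : Char) :
    pvPush (t :: rest) c = if pvOpp t c then rest else c :: t :: rest := by
  simp only [pvPush, pv_cond_eq]

theorem pvPush_good {s : List Char} {c : Char} (h : pvGood s) : pvGood (pvPush s c) := by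
  cases s with
  | nil => exact List.isChain_singleton c
  | cons t rest =>
    rw [pvPush_cons]
    by_cases hc : pvOpp t c = true
    · rw [if_pos hc]
      exact h.tail
    · rw [if_neg (by simp [hc])]
      exact List.IsChain.cons h (by intro y hy; simp only [List.head?_cons, Option.mem_def, Option.some.injEq] at hy; subst hy; exact Bool.eq_false_iff.mpr hc)

theorem pv_two_step {s : List Char} {a b : Char} (hs : pvGood s) (hab : pvOpp a b = true) :
    pvPush (pvPush s a) b = s := by
  cases s with
  | nil =>
    rw [pvPush_nil, pvPush_cons, if_pos hab]
  | cons t rest =>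
    rw [pvPush_cons]
    by_cases hta : pvOpp t a = true
    · rw [if_pos hta]
      have htb : t = b := pvOpp_unique hta hab
      cases rest with
      | nil => rw [pvPush_nil, htb]
      | cons u rest' =>
        have hut : pvOpp u t = false := (List.isChain_cons.mp hs).1 u (by simp)
        rw [pvPush_cons, ← htb, hut]
        simp
    · rw [if_neg (by simp [hta]), pvPush_cons, if_pos hab]

theorem pv_run_cancel (l1 : List Char) : ∀ {s : List Char} (a b : Char) (l2 : List Char),
    pvGood s → pvOpp a b = true →
    List.foldl pvPush s (l1 ++ a :: b :: l2) = List.foldl pvPush s (l1 ++ l2) := by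
  induction l1 with
  | nil =>
    intro s a b l2 hs hab
    simp only [List.nil_append, List.foldl_cons]
    rw [pv_two_step hs hab]
  | cons c l1' ih =>
    intro s a b l2 hs hab
    simp only [List.cons_append, List.foldl_cons]
    exact ih a b l2 (pvPush_good hs) hab

theorem pv_run_id : ∀ (l : List Char) (s : List Char),
    List.IsChain (fun x y => pvOpp x y = false) l →
    (∀ t ∈ s.head?, ∀ c ∈ l.head?, pvOpp t c = false) →
    List.foldl pvPush s l = l.reverse ++ s := by
  intro l
  induction l with
  | nil => intro s _ _; simp
  | cons c l' ih =>
    intro s hchain hhead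
    have hpush : pvPush s c = c :: s := by
      cases s with
      | nil => rfl
      | cons t rest =>
        rw [pvPush_cons, if_neg]
        simp only [Bool.not_eq_true]
        exact hhead t (by simp) c (by simp)
    simp only [List.foldl_cons, hpush]
    rw [ih (c :: s) hchain.tail ?_]
    · simp
    · intro t ht d hd
      simp only [List.head?_cons, Option.mem_def, Option.some.injEq] at ht
      subst ht
      cases l' with
      | nil => simp at hd
      | cons d' l'' =>
        simp only [List.head?_cons, Option.mem_def, Option.some.injEq] at hd
        subst hd
        exact (List.isChain_cons.mp hchain).1 d' (by simp)

theorem pvFoldl_scan_none {α : Type} (cond : Nat → Bool) (g : Nat → α) :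
    ∀ (l : List Nat) (acc : Option α),
      l.foldl (fun a i => if cond i then some (g i) else a) acc = none →
      acc = none ∧ ∀ i ∈ l, cond i = false := by
  intro l
  induction l with
  | nil => intro acc h; exact ⟨h, by simp⟩
  | cons x xs ih =>
    intro acc h
    simp only [List.foldl_cons] at h
    rcases ih _ h with ⟨hacc, hall⟩
    by_cases hx : cond x = true
    · rw [if_pos hx] at hacc; exact absurd hacc (by simp)
    · rw [if_neg (by simp [hx])] at hacc
      exact ⟨hacc, by intro i hi; rcases List.mem_cons.mp hi with rfl | hi'
                      · simpa using hx
                      · exact hall i hi'⟩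

theorem pvScan_none_chain {cs : List Char} (h : pvScan cs = none) :
    List.IsChain (fun x y => pvOpp x y = false) cs := by
  rcases pvFoldl_scan_none _ _ _ _ h with ⟨_, hall⟩
  rw [List.isChain_iff_getElem]
  intro i hi
  have := hall i (List.mem_range.mpr (by omega))
  rwa [List.getD_eq_getElem cs ' ' (by omega), List.getD_eq_getElem cs ' ' (by omega)] at this

theorem pv_decompose {cs : List Char} {i : Nat} (h : i + 1 < cs.length) :
    cs = cs.take i ++ cs[i] :: cs[i + 1] :: cs.drop (i + 2) := by
  conv_lhs => rw [← List.take_append_drop i cs]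
  congr 1
  rw [List.drop_eq_getElem_cons (by omega), List.drop_eq_getElem_cons (by omega)]

theorem pv_key : ∀ (n : Nat) (word : String), word.toList.length = n →
    fix_word word = fix_word_alt word := by
  intro n
  induction n using Nat.strong_induction_on with
  | _ n ih =>
    intro word hlen
    rw [fix_word]
    split
    case h_1 hscan =>
      have hchain := pvScan_none_chain hscan
      unfold fix_word_alt
      rw [pv_run_id word.toList [] hchain (by intro t ht; simp at ht)]
      simp
    case h_2 w2 hscan =>
      have hl := pvScan_length hscan
      have hne : (String.ofList w2 == word) = false := by
        rw [beq_eq_false_iff_ne]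
        intro he
        have h2 : w2 = word.toList := by simpa using congrArg String.toList he
        rw [h2] at hl
        omega
      rw [hne]
      simp only [Bool.false_eq_true, if_false]
      rw [ih (n - 2) (by omega) (String.ofList w2) (by simp only [String.toList_ofList]; omega)]
      unfold fix_word_alt
      rcases pvScan_shape hscan with ⟨i, hi, hopp, hw⟩
      rw [List.getD_eq_getElem word.toList ' ' (by omega),
          List.getD_eq_getElem word.toList ' ' (by omega)] at hopp
      have hdec := pv_decompose hi
      congr 2
      rw [String.toList_ofList, hw]
      conv_rhs => rw [hdec]
      rw [pv_run_cancel (word.toList.take i) _ _ _ (by simp [pvGood]) hopp]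

-- ===== VERDICT (by name: the statement is the Claim_ definition above) =====
theorem fix_word_spec : Claim_equal_fix_word := by
  intro word _
  unfold Spec_fix_word
  exact pv_key word.toList.length word rfl
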